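-- pv_equiv track=rewrite | github.com/DenBugNBA/YandexAlgorithmsTrainings | 5. Prefix sums and two pointers (1.0)/F_Air_conditioners.py | count_minimun_cost
-- ===== SOURCE A (Python) =====
-- def count_minimun_cost(required_powers, optimized_power_costs):
--     cost = 0
--     availaible_powers = sorted(optimized_power_costs.keys())
--     required_powers_sorted = sorted(required_powers)
--
--     current_power_index = 0
--     for current_required in required_powers_sorted:
--         while (
--             current_power_index < len(availaible_powers)
--             and current_required > availaible_powers[current_power_index]
--         ):
--             current_power_index += 1
--
--         power = availaible_powers[current_power_index]
--         cost += optimized_power_costs[power]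
--
--     return cost
-- ===== SOURCE B (Python) =====
-- def count_minimun_cost(required_powers, optimized_power_costs):
--     total = 0
--     for req in required_powers:
--         power = min(k for k in optimized_power_costs if k >= req)
--         total += optimized_power_costs[power]
--     return total
-- ===== Notes on version B (the rewrite author's own statement) =====
-- stated objective: simpler
-- what changed: A sorts both the requirements and the dict keys and sweeps a monotone two-pointer; B does a single pass over the unsorted requirements, selecting for each the minimum sufficient key directly with min() over a filtered generator (no sorting, no pointer state).
import Mathlib
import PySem

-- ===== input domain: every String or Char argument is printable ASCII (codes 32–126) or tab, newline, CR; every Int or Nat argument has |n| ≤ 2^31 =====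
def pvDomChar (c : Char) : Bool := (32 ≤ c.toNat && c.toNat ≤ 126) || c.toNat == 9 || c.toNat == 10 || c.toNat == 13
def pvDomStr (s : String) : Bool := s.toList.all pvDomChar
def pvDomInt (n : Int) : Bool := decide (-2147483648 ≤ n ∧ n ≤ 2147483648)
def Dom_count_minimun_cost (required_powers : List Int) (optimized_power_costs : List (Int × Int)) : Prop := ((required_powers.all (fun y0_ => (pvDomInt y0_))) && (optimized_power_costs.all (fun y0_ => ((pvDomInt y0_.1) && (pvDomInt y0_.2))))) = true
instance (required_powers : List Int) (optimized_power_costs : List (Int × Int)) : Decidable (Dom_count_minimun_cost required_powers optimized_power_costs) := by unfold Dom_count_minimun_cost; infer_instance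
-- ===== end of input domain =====

-- B replaces A's sort-both-lists + two-pointer sweep by a single pass over the unsorted
-- requirements that picks the minimum sufficient key directly (objective: simpler).

-- ===== PORT A =====
-- the inner `while` loop of A: advance the pointer past available powers smaller than r
def pvAdvance (avail : List Int) (r : Int) (i : Nat) : Nat :=
  if h : i < avail.length then
    if r > avail[i] then pvAdvance avail r (i + 1) else i
  else i
termination_by avail.length - i

def count_minimun_cost (required_powers : List Int) (optimized_power_costs : List (Int × Int)) : Int :=
  let d := PySem.Dict.ofList optimized_power_costs
  let availaible_powers := PySem.List.sorted d.keys (fun x => x) false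
  let required_powers_sorted := PySem.List.sorted required_powers (fun x => x) false
  -- `availaible_powers[current_power_index]` raises IndexError when the pointer runs off
  -- the end; Pre_ excludes exactly those inputs, so the `.getD 0` default is never taken there
  (required_powers_sorted.foldl
    (fun (st : Int × Nat) current_required =>
      let i := pvAdvance availaible_powers current_required st.2
      let power := (PySem.List.pyGet? availaible_powers (i : Int)).getD 0
      (st.1 + d.getD power 0, i))
    (0, 0)).1

-- ===== PORT B =====
def count_minimun_cost_alt (required_powers : List Int) (optimized_power_costs : List (Int × Int)) : Int :=
  let d := PySem.Dict.ofList optimized_power_costs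
  required_powers.foldl
    (fun total req =>
      -- `min(...)` raises ValueError on an empty generator; Pre_ excludes those inputs
      match PySem.List.min? (d.keys.filter (fun k => decide (req ≤ k))) (fun x => x) with
      | some power => total + d.getD power 0
      | none => total)
    0

-- ===== PRECONDITION & SPEC =====
-- Pre_ excludes exactly the inputs where some requirement exceeds every available power:
-- there A raises IndexError and B raises ValueError.
def Pre_count_minimun_cost (required_powers : List Int) (optimized_power_costs : List (Int × Int)) : Prop :=
  ∀ r ∈ required_powers, ∃ p ∈ optimized_power_costs, r ≤ p.1
instance (required_powers : List Int) (optimized_power_costs : List (Int × Int)) : Decidable (Pre_count_minimun_cost required_powers optimized_power_costs) := by unfold Pre_count_minimun_cost; infer_instance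

def pvWitness_count_minimun_cost : List Int × (List (Int × Int)) := ([3, 1, 4], [(2, 5), (4, 7)])

def Spec_count_minimun_cost (required_powers : List Int) (optimized_power_costs : List (Int × Int)) (out : Int) : Prop := out = count_minimun_cost_alt required_powers optimized_power_costs
instance (required_powers : List Int) (optimized_power_costs : List (Int × Int)) (out : Int) : Decidable (Spec_count_minimun_cost required_powers optimized_power_costs out) := by unfold Spec_count_minimun_cost; infer_instance

-- ===== CLAIM (what is proved, stated in full; the proofs are below) =====
def Claim_equal_count_minimun_cost : Prop := ∀ (required_powers : List Int) (optimized_power_costs : List (Int × Int)), Dom_count_minimun_cost required_powers optimized_power_costs → Pre_count_minimun_cost required_powers optimized_power_costs → Spec_count_minimun_cost required_powers optimized_power_costs (count_minimun_cost required_powers optimized_power_costs)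

-- ===== LEMMAS AND PROOFS =====

-- the per-requirement cost both programs pay: the cost of the cheapest sufficient power
def pvF (d : PySem.Dict Int Int) (r : Int) : Int :=
  match PySem.List.min? (d.keys.filter (fun k => decide (r ≤ k))) (fun x => x) with
  | some power => d.getD power 0
  | none => 0

lemma pvB_sum (d : PySem.Dict Int Int) (rs : List Int) : ∀ (total : Int),
    rs.foldl
      (fun total req =>
        match PySem.List.min? (d.keys.filter (fun k => decide (req ≤ k))) (fun x => x) with
        | some power => total + d.getD power 0
        | none => total) total
    = total + (rs.map (pvF d)).sum := by
  induction rs with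
  | nil => simp
  | cons r rest ih =>
    intro total
    simp only [List.foldl_cons, List.map_cons, List.sum_cons, pvF]
    cases h : PySem.List.min? (d.keys.filter (fun k => decide (r ≤ k))) (fun x => x) with
    | none => rw [ih]; ring
    | some p => rw [ih]; ring

lemma pvAdvance_le (avail : List Int) (r : Int) : ∀ (i : Nat), i ≤ avail.length →
    pvAdvance avail r i ≤ avail.length := by
  intro i
  fun_induction pvAdvance avail r i with
  | case1 i h hr ih => intro _; exact ih (by omega)
  | case2 i h hr => intro hi; exact hi
  | case3 i h => intro hi; exact hi

lemma pvAdvance_before (avail : List Int) (r : Int) : ∀ (i : Nat),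
    (∀ j, j < i → (hj : j < avail.length) → avail[j] < r) →
    ∀ j, j < pvAdvance avail r i → (hj : j < avail.length) → avail[j] < r := by
  intro i
  fun_induction pvAdvance avail r i with
  | case1 i h hr ih =>
    intro hb
    refine ih ?_
    intro j hj hjl
    rcases Nat.lt_succ_iff_lt_or_eq.mp hj with h' | h'
    · exact hb j h' hjl
    · subst h'; exact hr
  | case2 i h hr => intro hb; exact hb
  | case3 i h => intro hb; exact hb

lemma pvAdvance_stop (avail : List Int) (r : Int) : ∀ (i : Nat),
    (h : pvAdvance avail r i < avail.length) → r ≤ avail[pvAdvance avail r i] := by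
  intro i
  fun_induction pvAdvance avail r i with
  | case1 i h hr ih => exact ih
  | case2 i h hr => intro _; omega
  | case3 i h => intro hlt; omega

-- membership in the keys of a dict built from an association list
lemma mem_keys_ofList (l : List (Int × Int)) (k : Int) :
    k ∈ (PySem.Dict.ofList l).keys ↔ k ∈ l.map Prod.fst := by
  rw [PySem.Dict.ofList.eq_def, PySem.Dict.update,
    PySem.Dict.keys_foldl_insert_key l (fun p => p.1) (fun _ p => p.2) PySem.Dict.empty]
  simp [PySem.Set.mem_update, PySem.Dict.keys_empty]

-- the first sufficient element of the sorted key list is the minimum sufficient key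
lemma min_filter_keys (ks : List Int) (r : Int) (i : Nat)
    (hi : i < (PySem.List.sorted ks (fun x => x) false).length)
    (hb : ∀ j, j < i → (hj : j < (PySem.List.sorted ks (fun x => x) false).length) →
      (PySem.List.sorted ks (fun x => x) false)[j] < r)
    (hr : r ≤ (PySem.List.sorted ks (fun x => x) false)[i]) :
    PySem.List.min? (ks.filter (fun k => decide (r ≤ k))) (fun x => x)
      = some ((PySem.List.sorted ks (fun x => x) false)[i]) := by
  set l := PySem.List.sorted ks (fun x => x) false with hl
  have hperm : l.Perm ks := PySem.List.sorted_perm ks (fun x => x) false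
  have hpf : (l.filter (fun k => decide (r ≤ k))).Perm (ks.filter (fun k => decide (r ≤ k))) :=
    hperm.filter _
  have hmemf : l[i] ∈ ks.filter (fun k => decide (r ≤ k)) := by
    refine hpf.mem_iff.mp ?_
    exact List.mem_filter.mpr ⟨List.getElem_mem hi, by simpa using hr⟩
  cases hmin : PySem.List.min? (ks.filter (fun k => decide (r ≤ k))) (fun x => x) with
  | none =>
    rw [PySem.List.min?_eq_none_iff] at hmin
    rw [hmin] at hmemf
    simp at hmemf
  | some m =>
    have hm_mem := PySem.List.min?_mem hmin
    have hm_min := PySem.List.min?_isMin hmin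
    have h1 : m ≤ l[i] := hm_min _ hmemf
    have hm_in_l : m ∈ l := hperm.mem_iff.mpr (List.mem_filter.mp hm_mem).1
    have hrm : r ≤ m := by
      have := (List.mem_filter.mp hm_mem).2
      simpa using this
    obtain ⟨j, hj, hje⟩ := List.mem_iff_getElem.mp hm_in_l
    have hij : i ≤ j := by
      by_contra hcon
      have := hb j (by omega) hj
      omega
    have h2 : l[i] ≤ l[j] := by
      rcases Nat.lt_or_ge i j with h' | h'
      · have hp : l.Pairwise (fun a b => a ≤ b) := by
          have := PySem.List.sorted_pairwise ks (fun x => x)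
          simpa [hl] using this
        exact List.pairwise_iff_getElem.mp hp i j hi hj h'
      · have : i = j := by omega
        subst this; exact le_refl _
    rw [hje] at h2
    have : m = l[i] := le_antisymm h1 h2
    rw [this]

-- A's sorted two-pointer sweep pays pvF for every requirement
lemma pvA_loop (d : PySem.Dict Int Int) (rs : List Int) :
    ∀ (i : Nat) (acc : Int),
    rs.Pairwise (· ≤ ·) →
    (∀ r ∈ rs, ∃ k ∈ d.keys, r ≤ k) →
    i ≤ (PySem.List.sorted d.keys (fun x => x) false).length →
    (∀ r ∈ rs, ∀ j, j < i → (hj : j < (PySem.List.sorted d.keys (fun x => x) false).length) →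
      (PySem.List.sorted d.keys (fun x => x) false)[j] < r) →
    (rs.foldl
      (fun (st : Int × Nat) current_required =>
        let i := pvAdvance (PySem.List.sorted d.keys (fun x => x) false) current_required st.2
        let power := (PySem.List.pyGet? (PySem.List.sorted d.keys (fun x => x) false) (i : Int)).getD 0
        (st.1 + d.getD power 0, i))
      (acc, i)).1 = acc + (rs.map (pvF d)).sum := by
  induction rs with
  | nil => intro i acc _ _ _ _; simp
  | cons r rest ih =>
    intro i acc hpw hex hile hb
    set A := PySem.List.sorted d.keys (fun x => x) false with hA
    set i' := pvAdvance A r i with hi'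
    have hb_r : ∀ j, j < i → (hj : j < A.length) → A[j] < r :=
      fun j hj hjl => hb r (List.mem_cons_self) j hj hjl
    have hbefore : ∀ j, j < i' → (hj : j < A.length) → A[j] < r :=
      pvAdvance_before A r i hb_r
    have hi'le : i' ≤ A.length := pvAdvance_le A r i hile
    have hi'lt : i' < A.length := by
      rcases Nat.lt_or_ge i' A.length with h' | h'
      · exact h'
      · exfalso
        obtain ⟨k, hk_mem, hk_le⟩ := hex r List.mem_cons_self
        have hkA : k ∈ A := (PySem.List.sorted_perm d.keys (fun x => x) false).mem_iff.mpr hk_mem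
        obtain ⟨j, hj, hje⟩ := List.mem_iff_getElem.mp hkA
        have := hbefore j (by omega) hj
        omega
    have hstop : r ≤ A[i'] := pvAdvance_stop A r i hi'lt
    have hget : (PySem.List.pyGet? A (i' : Int)).getD 0 = A[i'] := by
      rw [PySem.List.pyGet?_natCast, List.getElem?_eq_getElem hi'lt]
      rfl
    have hcost : d.getD A[i'] 0 = pvF d r := by
      rw [pvF, min_filter_keys d.keys r i' hi'lt hbefore hstop]
    rw [List.foldl_cons]
    have hstep : (let i_1 := pvAdvance A r (acc, i).2
        let power := (PySem.List.pyGet? A (i_1 : Int)).getD 0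
        ((acc, i).1 + d.getD power 0, i_1)) = (acc + pvF d r, i') := by
      show (acc + d.getD ((PySem.List.pyGet? A ((pvAdvance A r i : Nat) : Int)).getD 0) 0,
        pvAdvance A r i) = _
      rw [← hi', hget, hcost]
    rw [hstep, ih i' (acc + pvF d r) (List.Pairwise.of_cons hpw)
      (fun r' hr' => hex r' (List.mem_cons_of_mem _ hr')) hi'le
      (fun r' hr' j hj hjl => lt_of_lt_of_le (hbefore j hj hjl)
        (List.rel_of_pairwise_cons hpw hr')), List.map_cons, List.sum_cons]
    ring

-- ===== VERDICT (by name: the statement is the Claim_ definition above) =====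
theorem count_minimun_cost_spec : Claim_equal_count_minimun_cost := by
  intro rp costs _hdom hpre
  unfold Spec_count_minimun_cost count_minimun_cost count_minimun_cost_alt
  simp only []
  set d := PySem.Dict.ofList costs with hd
  rw [pvB_sum d rp 0]
  have hex : ∀ r ∈ PySem.List.sorted rp (fun x => x) false, ∃ k ∈ d.keys, r ≤ k := by
    intro r hr
    have hr' : r ∈ rp := (PySem.List.sorted_perm rp (fun x => x) false).mem_iff.mp hr
    obtain ⟨p, hp_mem, hp_le⟩ := hpre r hr'
    exact ⟨p.1, (mem_keys_ofList costs p.1).mpr (List.mem_map_of_mem hp_mem), hp_le⟩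
  rw [pvA_loop d (PySem.List.sorted rp (fun x => x) false) 0 0
      (by simpa using PySem.List.sorted_pairwise rp (fun x => x)) hex
      (Nat.zero_le _) (fun r _ j hj _ => absurd hj (Nat.not_lt_zero j))]
  congr 1
  exact ((PySem.List.sorted_perm rp (fun x => x) false).map (pvF d)).sum_eq
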